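-- pv_equiv track=rewrite | github.com/codesquad-backend-study/algorithm-study | programmers/sully/week45/불량_사용자.py | make_possible_bad_users
-- ===== SOURCE A (Python) =====
-- def make_possible_bad_users(banned_id, user_id):
--     possible_bad_users = []
--
--     for bid in banned_id:
--         tmp = []
--         for uid in user_id:
--
--             if len(uid) == len(bid):
--                 flag = True
--
--                 for i in range(len(uid)):
--                     if (uid[i] != bid[i]) and (bid[i] != '*'):
--                         flag = False
--                         break
--
--                 if flag:
--                     tmp.append(uid)
--
--         possible_bad_users.append(tmp)
--
--     return possible_bad_users
-- ===== SOURCE B (Python) =====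
-- def make_possible_bad_users(banned_id, user_id):
--     # group user ids by length once, then only scan the matching bucket per ban
--     buckets = {}
--     for uid in user_id:
--         buckets.setdefault(len(uid), []).append(uid)
--     return [[uid for uid in buckets.get(len(bid), [])
--              if all(b == '*' or u == b for u, b in zip(uid, bid))]
--             for bid in banned_id]
-- ===== Notes on version B (the rewrite author's own statement) =====
-- stated objective: alternative
-- what changed: B builds a dict bucketing user_ids by length once and matches each banned pattern only against its own bucket with a zip-based all() wildcard test, replacing A's per-user length check and indexed per-character loop with break.
import Mathlib
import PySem

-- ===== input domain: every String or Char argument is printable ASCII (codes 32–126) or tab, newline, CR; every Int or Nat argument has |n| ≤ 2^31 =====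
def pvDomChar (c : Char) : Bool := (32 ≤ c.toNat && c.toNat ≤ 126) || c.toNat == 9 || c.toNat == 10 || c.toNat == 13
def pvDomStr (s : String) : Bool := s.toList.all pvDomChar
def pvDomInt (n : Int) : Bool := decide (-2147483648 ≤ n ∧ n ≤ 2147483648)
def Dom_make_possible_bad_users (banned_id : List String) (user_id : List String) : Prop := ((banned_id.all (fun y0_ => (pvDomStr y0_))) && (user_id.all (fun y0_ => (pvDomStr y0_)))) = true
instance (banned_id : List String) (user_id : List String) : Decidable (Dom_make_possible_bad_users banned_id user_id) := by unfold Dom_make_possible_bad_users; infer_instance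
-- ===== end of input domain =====

-- B groups the user ids by length once (a dict bucket per length) and matches each
-- banned pattern only against its own bucket with a zip-based wildcard test; objective: alternative.

-- ===== PORT A =====
-- A's inner character loop with break: walk both strings in step, stop at the
-- first position where the characters differ and the pattern char is not '*'.
def pvACharLoop : List Char → List Char → Bool
  | u :: us, b :: bs => if u ≠ b ∧ b ≠ '*' then false else pvACharLoop us bs
  | _, _ => true

def make_possible_bad_users (banned_id : List String) (user_id : List String) : List (List String) :=
  banned_id.foldl (fun possible_bad_users bid =>
    possible_bad_users ++
      [user_id.foldl (fun tmp uid =>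
        if PySem.Str.len uid == PySem.Str.len bid then
          (if pvACharLoop uid.toList bid.toList then tmp ++ [uid] else tmp)
        else tmp) []]) []

-- ===== PORT B =====
def pvZipMatch (uid bid : String) : Bool :=
  (uid.toList.zip bid.toList).all fun p => p.2 == '*' || p.1 == p.2

def pvBuckets (user_id : List String) : PySem.Dict Int (List String) :=
  user_id.foldl (fun d uid => d.modify (PySem.Str.len uid) [] (· ++ [uid])) PySem.Dict.empty

def make_possible_bad_users_alt (banned_id : List String) (user_id : List String) : List (List String) :=
  let buckets := pvBuckets user_id
  banned_id.map (fun bid =>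
    (buckets.getD (PySem.Str.len bid) []).filter (fun uid => pvZipMatch uid bid))

-- ===== PRECONDITION & SPEC =====
def Spec_make_possible_bad_users (banned_id : List String) (user_id : List String) (out : List (List String)) : Prop := out = make_possible_bad_users_alt banned_id user_id
instance (banned_id : List String) (user_id : List String) (out : List (List String)) : Decidable (Spec_make_possible_bad_users banned_id user_id out) := by unfold Spec_make_possible_bad_users; infer_instance

-- ===== CLAIM (what is proved, stated in full; the proofs are below) =====
def Claim_equal_make_possible_bad_users : Prop := ∀ (banned_id : List String) (user_id : List String), Dom_make_possible_bad_users banned_id user_id → Spec_make_possible_bad_users banned_id user_id (make_possible_bad_users banned_id user_id)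

-- ===== LEMMAS AND PROOFS =====

-- the bucket for key L holds exactly the user ids of length L, in order
theorem pvBuckets_aux (xs : List String) (d : PySem.Dict Int (List String)) (L : Int) :
    (xs.foldl (fun d uid => d.modify (PySem.Str.len uid) [] (· ++ [uid])) d).getD L [] =
      d.getD L [] ++ xs.filter (fun u => PySem.Str.len u == L) := by
  induction xs generalizing d with
  | nil => simp
  | cons x xs ih =>
    simp only [List.foldl_cons, ih, PySem.Dict.getD_modify, List.filter_cons]
    by_cases h : (x.length : Int) = L
    · subst h; simp
    · simp [h, Ne.symm h, PySem.Str.len]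

theorem pvBuckets_getD (user_id : List String) (L : Int) :
    (pvBuckets user_id).getD L [] = user_id.filter (fun u => PySem.Str.len u == L) := by
  unfold pvBuckets
  rw [pvBuckets_aux]
  simp [PySem.Dict.getD_empty]

-- on equal-length char lists A's break loop computes the zip test
theorem pvACharLoop_eq_zip (u b : List Char) (h : u.length = b.length) :
    pvACharLoop u b = (u.zip b).all fun p => p.2 == '*' || p.1 == p.2 := by
  induction u generalizing b with
  | nil => cases b <;> simp [pvACharLoop]
  | cons uc us ih =>
    cases b with
    | nil => simp at h
    | cons bc bs =>
      simp only [List.length_cons, Nat.succ.injEq] at h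
      rw [List.zip_cons_cons, List.all_cons, ← ih bs h]
      by_cases h1 : uc = bc
      · simp [pvACharLoop, h1]
      · by_cases h2 : bc = '*'
        · simp [pvACharLoop, h2]
        · simp [pvACharLoop, h1, h2]

-- A's inner accumulation loop is a filter over user_id
theorem pvInner_eq (user_id : List String) (bid : String) :
    (user_id.foldl (fun tmp uid =>
        if PySem.Str.len uid == PySem.Str.len bid then
          (if pvACharLoop uid.toList bid.toList then tmp ++ [uid] else tmp)
        else tmp) []) =
    (user_id.filter (fun u => PySem.Str.len u == PySem.Str.len bid)).filter
      (fun uid => pvZipMatch uid bid) := by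
  have hfun : (fun (tmp : List String) uid =>
      if PySem.Str.len uid == PySem.Str.len bid then
        (if pvACharLoop uid.toList bid.toList then tmp ++ [uid] else tmp)
      else tmp) =
      (fun tmp uid =>
        if (PySem.Str.len uid == PySem.Str.len bid && pvACharLoop uid.toList bid.toList) then
          tmp ++ [uid] else tmp) := by
    funext tmp uid
    by_cases h1 : PySem.Str.len uid == PySem.Str.len bid <;>
      by_cases h2 : pvACharLoop uid.toList bid.toList <;> simp [*]
  rw [hfun, PySem.List.foldl_append_if_eq_filter, List.filter_filter, List.nil_append]
  refine List.filter_congr ?_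
  intro u _
  by_cases hlen : (u.length : Int) = (bid.length : Int)
  · have hl : u.toList.length = bid.toList.length := by
      have : u.length = bid.length := by exact_mod_cast hlen
      simpa using this
    simp [PySem.Str.len, hlen, pvZipMatch, pvACharLoop_eq_zip _ _ hl, Bool.and_comm]
  · have hb : (((u.length : Int)) == ((bid.length : Int))) = false :=
      beq_eq_false_iff_ne.mpr hlen
    simp [PySem.Str.len, hb]

-- ===== VERDICT (by name: the statement is the Claim_ definition above) =====
theorem make_possible_bad_users_spec : Claim_equal_make_possible_bad_users := by
  intro banned_id user_id _
  unfold Spec_make_possible_bad_users make_possible_bad_users make_possible_bad_users_alt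
  rw [PySem.List.foldl_append_singleton_eq_map]
  simp only [List.nil_append]
  refine List.map_congr_left ?_
  intro bid _
  rw [pvInner_eq, pvBuckets_getD]
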